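-- pv_equiv track=rewrite | github.com/Ranjan1231231/100DAYSOFCODE | Day-3-Sliding-subarray-beauty.py | newarray
-- ===== SOURCE A (Python) =====
-- def newarray(array,subarraysize,n):
--     n=n-1
--     subarray=[]
--     arraysize=len(array)
--     while len(array) >= subarraysize:
--         temparray=array[0:subarraysize]
--         temparray.sort()
--         subarray.append(temparray[n])
--         array.remove(temparray[n])
--     return subarray
-- ===== SOURCE B (Python) =====
-- def newarray(array, subarraysize, n):
--     s = subarraysize
--     m = len(array)
--     if m < s:
--         return []
--     idx = (n - 1) % s  # Python index into the sorted window, normalized to 0..s-1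
--     window = sorted(array[:s])
--     out = []
--     for j in range(s, m + 1):
--         out.append(window.pop(idx))
--         if j < m:
--             x = array[j]
--             i = 0
--             while i < len(window) and window[i] < x:
--                 i += 1
--             window.insert(i, x)
--     return out
-- ===== Notes on version B (the rewrite author's own statement) =====
-- stated objective: faster
-- what changed: Instead of re-sorting the k-prefix and scanning the whole list with remove() on every iteration, B maintains one incrementally sorted window: it pops the element at the fixed rank and re-inserts the next array element in sorted position, one pass over the array.
import Mathlib
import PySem

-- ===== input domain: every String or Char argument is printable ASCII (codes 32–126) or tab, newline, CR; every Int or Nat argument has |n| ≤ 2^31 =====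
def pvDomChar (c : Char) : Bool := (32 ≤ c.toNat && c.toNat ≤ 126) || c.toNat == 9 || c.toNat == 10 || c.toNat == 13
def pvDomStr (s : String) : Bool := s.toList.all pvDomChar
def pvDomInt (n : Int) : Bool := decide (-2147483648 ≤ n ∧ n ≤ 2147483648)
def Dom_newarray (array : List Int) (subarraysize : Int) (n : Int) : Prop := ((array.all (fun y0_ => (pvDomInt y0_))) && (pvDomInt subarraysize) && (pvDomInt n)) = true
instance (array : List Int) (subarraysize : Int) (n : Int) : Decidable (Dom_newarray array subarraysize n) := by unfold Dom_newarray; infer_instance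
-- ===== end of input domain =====

-- B replaces A's per-step re-sort of the prefix and whole-array remove() with one incrementally
-- maintained sorted window (pop at a fixed rank, sorted re-insertion of the next element).
-- A mutates its `array` argument in place (remove()); B does not — the equivalence proved here is about the RETURN value only.

-- ===== PORT A =====
-- termination helper for the port: a successful remove() shortens the list
lemma remove?_length_lt {xs ys : List Int} {v : Int} (h : PySem.List.remove? xs v = some ys) :
    ys.length < xs.length := by
  by_cases hv : v ∈ xs
  · rw [PySem.List.remove?_eq_some_erase xs v hv] at h
    cases h
    have := List.length_erase_of_mem hv
    have := List.length_pos_of_mem hv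
    omega
  · rw [(PySem.List.remove?_eq_none_iff xs v).mpr hv] at h
    cases h

def newarrayLoop (array : List Int) (subarraysize n : Int) (subarray : List Int) : List Int :=
  if subarraysize ≤ (array.length : Int) then
    let temparray := PySem.List.sorted (PySem.List.slice array (some 0) (some subarraysize)) (fun x => x) false
    match PySem.List.pyGet? temparray n with
    | none => subarray          -- Python raises IndexError here (excluded by Pre_)
    | some v =>
      match h : PySem.List.remove? array v with
      | none => subarray        -- unreachable: v is an element of array
      | some array' => newarrayLoop array' subarraysize n (subarray ++ [v])
  else subarray
termination_by array.length
decreasing_by exact remove?_length_lt h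

def newarray (array : List Int) (subarraysize : Int) (n : Int) : List Int :=
  newarrayLoop array subarraysize (n - 1) []

-- ===== PORT B =====
-- linear scan for the insertion point:  i = 0; while i < len(window) and window[i] < x: i += 1
def insPos : List Int → Int → Nat
  | [], _ => 0
  | w :: ws, x => if w < x then insPos ws x + 1 else 0

def windowLoop (window : List Int) (idx : Int) (rest out : List Int) : List Int :=
  match PySem.List.pop? window idx with
  | none => out               -- unreachable under Pre_
  | some (v, window') =>
    match rest with
    | [] => out ++ [v]
    | x :: rest' =>
        windowLoop (PySem.List.insert window' ((insPos window' x : Nat) : Int) x) idx rest' (out ++ [v])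

def newarray_alt (array : List Int) (subarraysize : Int) (n : Int) : List Int :=
  if (array.length : Int) < subarraysize then []
  else
    windowLoop
      (PySem.List.sorted (PySem.List.slice array (some 0) (some subarraysize)) (fun x => x) false)
      (PySem.Int.mod (n - 1) subarraysize)
      (array.drop subarraysize.toNat) []

-- ===== PRECONDITION & SPEC =====
-- Pre_ is exactly where the Python A returns: subarraysize ≥ 1 (otherwise the window is
-- eventually empty and temparray[n-1] raises IndexError / the loop never terminates), and,
-- whenever the loop runs at all (len(array) ≥ subarraysize), n-1 must be a valid Python index
-- into the window of length subarraysize.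
def Pre_newarray (array : List Int) (subarraysize : Int) (n : Int) : Prop :=
  1 ≤ subarraysize ∧
    ((array.length : Int) < subarraysize ∨ (1 - subarraysize ≤ n ∧ n ≤ subarraysize))
instance (array : List Int) (subarraysize : Int) (n : Int) : Decidable (Pre_newarray array subarraysize n) := by unfold Pre_newarray; infer_instance

def pvWitness_newarray : List Int × Int × Int := ([3, 1, 2, 5, 4], 2, 1)

def Spec_newarray (array : List Int) (subarraysize : Int) (n : Int) (out : List Int) : Prop := out = newarray_alt array subarraysize n
instance (array : List Int) (subarraysize : Int) (n : Int) (out : List Int) : Decidable (Spec_newarray array subarraysize n out) := by unfold Spec_newarray; infer_instance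

-- ===== CLAIM (what is proved, stated in full; the proofs are below) =====
def Claim_equal_newarray : Prop := ∀ (array : List Int) (subarraysize : Int) (n : Int), Dom_newarray array subarraysize n → Pre_newarray array subarraysize n → Spec_newarray array subarraysize n (newarray array subarraysize n)

-- ===== LEMMAS AND PROOFS =====

lemma insPos_le (ws : List Int) (x : Int) : insPos ws x ≤ ws.length := by
  induction ws with
  | nil => simp [insPos]
  | cons w ws ih => simp only [insPos, List.length_cons]; split <;> omega

lemma insert_nat (xs : List Int) (k : Nat) (h : k ≤ xs.length) (v : Int) :
    PySem.List.insert xs (k : Int) v = xs.take k ++ v :: xs.drop k := by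
  have hk : ((if (k:Int) < 0 then max ((k:Int) + ↑xs.length) 0 else min (k:Int) ↑xs.length)).toNat = k := by omega
  simp [PySem.List.insert, PySem.List.sliceIndices, hk]

lemma insert_insPos (ws : List Int) (x : Int) :
    PySem.List.insert ws ((insPos ws x : Nat) : Int) x = List.orderedInsert (· ≤ ·) x ws := by
  induction ws with
  | nil => simpa using insert_nat [] 0 (by simp) x
  | cons w ws ih =>
    rw [insert_nat _ _ (insPos_le _ _)]
    rw [insert_nat _ _ (insPos_le _ _)] at ih
    by_cases hw : w < x
    · simp [insPos, hw, List.orderedInsert, not_le.mpr hw, ih]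
    · simp [insPos, hw, List.orderedInsert, not_lt.mp hw]

lemma pyIdx_mod (L : Nat) (i s : Int) (hL : (L:Int) = s) (h0 : 0 < s) (h1 : -s ≤ i) (h2 : i < s) :
    PySem.List.pyIdx? L i = some (PySem.Int.mod i s).toNat := by
  have hm : PySem.Int.mod i s = i % s := PySem.Int.mod_eq_emod_of_pos h0
  have hv : i % s = if 0 ≤ i then i else i + s := by
    split_ifs with h
    · exact Int.emod_eq_of_lt h (by omega)
    · rw [show i % s = (i + s) % s by simp]
      exact Int.emod_eq_of_lt (by omega) (by omega)
  simp only [PySem.List.pyIdx?, hm, hv]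
  split_ifs <;> congr 1 <;> omega

lemma pyGet_mod (xs : List Int) (i s : Int) (hL : (xs.length:Int) = s) (h0 : 0 < s) (h1 : -s ≤ i) (h2 : i < s) :
    PySem.List.pyGet? xs i = some (xs[(PySem.Int.mod i s).toNat]'(by
      have := PySem.Int.mod_nonneg i h0; have := PySem.Int.mod_lt i h0; omega)) := by
  rw [PySem.List.pyGet?, pyIdx_mod _ _ _ hL h0 h1 h2]
  simp

lemma pop_nonneg (xs : List Int) (i : Int) (h0 : 0 ≤ i) (h1 : i < xs.length) :
    PySem.List.pop? xs i = some ((xs[i.toNat]'(by omega)), xs.eraseIdx i.toNat) := by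
  have : PySem.List.pyIdx? xs.length i = some i.toNat := by
    simp [PySem.List.pyIdx?, h0]; omega
  rw [PySem.List.pop?, this]
  simp

lemma windowLoop_nil (window : List Int) (idx : Int) (out : List Int) (v : Int) (w' : List Int)
    (h : PySem.List.pop? window idx = some (v, w')) :
    windowLoop window idx [] out = out ++ [v] := by
  rw [windowLoop, h]

lemma windowLoop_cons (window : List Int) (idx x : Int) (rest out : List Int) (v : Int) (w' : List Int)
    (h : PySem.List.pop? window idx = some (v, w')) :
    windowLoop window idx (x :: rest) out =
      windowLoop (PySem.List.insert w' ((insPos w' x : Nat) : Int) x) idx rest (out ++ [v]) := by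
  rw [windowLoop, h]

lemma loop_eq (s n : Int) (hs : 1 ≤ s) (h1 : 1 - s ≤ n) (h2 : n ≤ s) :
    ∀ arr out : List Int, newarrayLoop arr s (n - 1) out =
      if (arr.length : Int) < s then out
      else windowLoop (PySem.List.sorted (arr.take s.toNat) (fun x => x) false)
             (PySem.Int.mod (n - 1) s) (arr.drop s.toNat) out := by
  have hmain : ∀ N (arr out : List Int), arr.length ≤ N → newarrayLoop arr s (n - 1) out =
      if (arr.length : Int) < s then out
      else windowLoop (PySem.List.sorted (arr.take s.toNat) (fun x => x) false)
             (PySem.Int.mod (n - 1) s) (arr.drop s.toNat) out := by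
    intro N
    induction N with
    | zero =>
      intro arr out hN
      have harr : arr = [] := List.eq_nil_of_length_eq_zero (by omega)
      subst harr
      rw [newarrayLoop]
      simp only [List.length_nil]
      rw [if_neg (by push_cast; omega), if_pos (by push_cast; omega)]
    | succ N ih =>
      intro arr out hN
      by_cases hlt : (arr.length : Int) < s
      · rw [newarrayLoop, if_neg (by omega), if_pos hlt]
      · rw [if_neg hlt]
        set t := s.toNat with ht
        have hts : (t : Int) = s := by omega
        have htlen : t ≤ arr.length := by omega
        have hsl : PySem.List.slice arr (some 0) (some s) = arr.take t := by
          rw [PySem.List.slice_zero_start, PySem.List.slice_to _ (by omega)]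
        set W := PySem.List.sorted (arr.take t) (fun x => x) false with hW
        have hWlen : W.length = t := by
          rw [hW, PySem.List.length_sorted, List.length_take]; omega
        set m := PySem.Int.mod (n - 1) s with hm
        have hm0 : 0 ≤ m := PySem.Int.mod_nonneg _ (by omega)
        have hm1 : m < s := PySem.Int.mod_lt _ (by omega)
        have hkW : m.toNat < W.length := by omega
        set k := m.toNat with hk
        set v := W[k]'hkW with hv
        -- both programs select v = sorted(prefix)[k]
        have hget : PySem.List.pyGet? W (n - 1) = some v :=
          pyGet_mod W (n - 1) s (by omega) (by omega) (by omega) (by omega)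
        have hpop : PySem.List.pop? W m = some (v, W.eraseIdx k) := by
          have := pop_nonneg W m hm0 (by omega)
          simpa [← hk] using this
        have hvW : v ∈ W := List.getElem_mem hkW
        have hvTake : v ∈ arr.take t := (PySem.List.mem_sorted _ _ _ _).mp hvW
        have hvArr : v ∈ arr := List.mem_of_mem_take hvTake
        have hrem : PySem.List.remove? arr v = some (arr.erase v) :=
          PySem.List.remove?_eq_some_erase arr v hvArr
        -- one step of A
        have hstep : newarrayLoop arr s (n - 1) out = newarrayLoop (arr.erase v) s (n - 1) (out ++ [v]) := by
          rw [newarrayLoop, if_pos (by omega)]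
          simp only [hsl, ← hW, hget]
          split
          · next heq => rw [hrem] at heq; cases heq
          · next arr' heq => rw [hrem] at heq; cases heq; rfl
        have herase : arr.erase v = (arr.take t).erase v ++ arr.drop t := by
          conv_lhs => rw [← List.take_append_drop t arr]
          rw [List.erase_append_left _ hvTake]
        have hPlen : ((arr.take t).erase v).length = t - 1 := by
          rw [List.length_erase_of_mem hvTake, List.length_take]; omega
        have hW' : List.Perm (W.eraseIdx k) ((arr.take t).erase v) := by
          have p1 : List.Perm W (v :: W.eraseIdx k) := (List.getElem_cons_eraseIdx_perm hkW).symm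
          have p2 : List.Perm W (arr.take t) := PySem.List.sorted_perm _ _ _
          have p3 : List.Perm (arr.take t) (v :: (arr.take t).erase v) := List.perm_cons_erase hvTake
          exact (p1.symm.trans (p2.trans p3)).cons_inv
        have hW'pair : (W.eraseIdx k).Pairwise (· ≤ ·) := by
          have hp := PySem.List.sorted_pairwise (xs := arr.take t) (key := fun x => x)
          exact List.Pairwise.sublist (List.eraseIdx_sublist W k) hp
        have herlen : (arr.erase v).length = arr.length - 1 := List.length_erase_of_mem hvArr
        rw [hstep, ih _ _ (by omega)]
        rcases hdr : arr.drop t with _ | ⟨x, rest'⟩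
        · -- the loop ends: len(array) = subarraysize
          have : arr.length = t := by
            have := List.length_drop (i := t) (l := arr); rw [hdr] at this; simp at this; omega
          rw [if_pos (by omega), windowLoop_nil W m out v _ hpop]
        · -- window slides: drop v, insert x = arr[t]
          have hlen' : t < arr.length := by
            have := List.length_drop (i := t) (l := arr); rw [hdr] at this; simp at this; omega
          rw [if_neg (by omega)]
          -- rest and accumulator agree; it remains to identify the two windows
          have hdrop' : (arr.erase v).drop t = rest' := by
            rw [herase, hdr]
            have h2 : ((arr.take t).erase v ++ x :: rest').drop (((arr.take t).erase v).length + 1)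
                = (x :: rest').drop 1 := List.drop_length_add_append 1
            rw [show ((arr.take t).erase v).length + 1 = t from by omega] at h2
            simpa using h2
          have htake' : (arr.erase v).take t = (arr.take t).erase v ++ [x] := by
            rw [herase, hdr]
            have h2 : ((arr.take t).erase v ++ x :: rest').take (((arr.take t).erase v).length + 1)
                = (arr.take t).erase v ++ (x :: rest').take 1 := List.take_length_add_append 1
            rw [show ((arr.take t).erase v).length + 1 = t from by omega] at h2
            simpa using h2
          have hwin : PySem.List.sorted ((arr.erase v).take t) (fun x => x) false =
              PySem.List.insert (W.eraseIdx k) ((insPos (W.eraseIdx k) x : Nat) : Int) x := by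
            rw [insert_insPos, htake']
            apply PySem.List.sorted_id_eq_of_perm_of_pairwise
            · have p1 := List.perm_orderedInsert (· ≤ ·) x (W.eraseIdx k)
              have p2 : List.Perm (x :: W.eraseIdx k) (x :: (arr.take t).erase v) := hW'.cons x
              have p3 : List.Perm (x :: (arr.take t).erase v) ((arr.take t).erase v ++ [x]) :=
                (List.perm_append_singleton x _).symm
              exact p1.trans (p2.trans p3)
            · exact List.Pairwise.orderedInsert x _ hW'pair
          rw [hdrop', hwin, windowLoop_cons W m x rest' out v _ hpop]
  intro arr out
  exact hmain arr.length arr out le_rfl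

-- ===== VERDICT (by name: the statement is the Claim_ definition above) =====
theorem newarray_spec : Claim_equal_newarray := by
  intro arr s n _ hpre
  obtain ⟨hs, hor⟩ := hpre
  unfold Spec_newarray newarray newarray_alt
  rcases hor with hlt | ⟨h1, h2⟩
  · rw [if_pos hlt, newarrayLoop, if_neg (by omega)]
  · rw [loop_eq s n hs h1 h2 arr []]
    by_cases hlt : (arr.length : Int) < s
    · rw [if_pos hlt, if_pos hlt]
    · rw [if_neg hlt, if_neg hlt,
        PySem.List.slice_zero_start, PySem.List.slice_to _ (by omega)]
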